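-- pv_equiv track=rewrite | github.com/literism/tree | init_dataset/enrich_references.py | is_file_download_url
-- ===== SOURCE A (Python) =====
-- def is_file_download_url(url: str) -> bool:
--     """判断URL是否是文件下载地址"""
--     file_extensions = [
--         '.pdf', '.doc', '.docx', '.xls', '.xlsx', '.ppt', '.pptx',
--         '.zip', '.rar', '.tar', '.gz', '.7z',
--         '.mp3', '.mp4', '.avi', '.mov', '.wmv',
--         '.jpg', '.jpeg', '.png', '.gif', '.svg',
--         '.exe', '.dmg', '.apk',
--         '.xml', '.csv'
--     ]
--
--     url_lower = url.lower()
--     for ext in file_extensions: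
--         if url_lower.endswith(ext) or f'{ext}?' in url_lower or f'{ext}#' in url_lower:
--             return True
--
--     return False
-- ===== SOURCE B (Python) =====
-- _EXTS = frozenset([
--     '.pdf', '.doc', '.docx', '.xls', '.xlsx', '.ppt', '.pptx',
--     '.zip', '.rar', '.tar', '.gz', '.7z',
--     '.mp3', '.mp4', '.avi', '.mov', '.wmv',
--     '.jpg', '.jpeg', '.png', '.gif', '.svg',
--     '.exe', '.dmg', '.apk',
--     '.xml', '.csv'
-- ])
--
--
-- def is_file_download_url(url: str) -> bool:
--     """One right-to-left pass: a match is a '.'-started segment that runs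
--     exactly to the next '?', '#' or the end of the URL and is a known
--     extension; seg keeps (at most 6 chars of) that segment incrementally."""
--     seg = ''
--     for c in reversed(url.lower()):
--         if c in '?#':
--             seg = ''
--         else:
--             seg = (c + seg)[:6]
--             if c == '.' and seg in _EXTS:
--                 return True
--     return False
-- ===== Notes on version B (the rewrite author's own statement) =====
-- stated objective: alternative
-- what changed: Replaces the per-extension loop of endswith and substring searches by a single right-to-left scan of the URL that maintains the capped segment up to the next delimiter or the end and tests it against a frozenset of extensions.
import Mathlib
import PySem

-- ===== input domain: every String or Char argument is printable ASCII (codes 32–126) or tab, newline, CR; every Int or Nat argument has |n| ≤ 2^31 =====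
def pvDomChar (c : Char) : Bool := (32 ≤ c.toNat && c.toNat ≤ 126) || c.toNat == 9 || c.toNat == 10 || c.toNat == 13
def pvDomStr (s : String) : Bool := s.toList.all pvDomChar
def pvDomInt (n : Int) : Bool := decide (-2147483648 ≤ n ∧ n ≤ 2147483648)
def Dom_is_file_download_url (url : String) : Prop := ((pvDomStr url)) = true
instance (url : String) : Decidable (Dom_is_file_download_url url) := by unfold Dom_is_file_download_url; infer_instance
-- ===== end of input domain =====

-- B replaces A's per-extension endswith/substring loop by one right-to-left scan of the URL
-- maintaining the segment up to the next '?'/'#'/end (alternative decomposition, same cost class).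

-- ===== PORT A =====
def pvExtsA : List String :=
  [".pdf", ".doc", ".docx", ".xls", ".xlsx", ".ppt", ".pptx",
   ".zip", ".rar", ".tar", ".gz", ".7z",
   ".mp3", ".mp4", ".avi", ".mov", ".wmv",
   ".jpg", ".jpeg", ".png", ".gif", ".svg",
   ".exe", ".dmg", ".apk",
   ".xml", ".csv"]

def is_file_download_url (url : String) : Bool :=
  let url_lower := PySem.Str.lower url
  pvExtsA.any (fun ext =>
    PySem.Str.endswith url_lower ext
      || PySem.Str.isIn (ext ++ "?") url_lower
      || PySem.Str.isIn (ext ++ "#") url_lower)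

-- ===== PORT B =====
def pvExtsB : List (List Char) :=
  [".pdf".toList, ".doc".toList, ".docx".toList, ".xls".toList, ".xlsx".toList,
   ".ppt".toList, ".pptx".toList, ".zip".toList, ".rar".toList, ".tar".toList,
   ".gz".toList, ".7z".toList, ".mp3".toList, ".mp4".toList, ".avi".toList,
   ".mov".toList, ".wmv".toList, ".jpg".toList, ".jpeg".toList, ".png".toList,
   ".gif".toList, ".svg".toList, ".exe".toList, ".dmg".toList, ".apk".toList,
   ".xml".toList, ".csv".toList]

-- right-to-left scan of Source B: state = (found, seg); `seg` carries the Python string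
-- seg = (c + seg)[:6] as a capped list of chars (exact: same characters, same cap)
def pvScanB : List Char → Bool × List Char
  | [] => (false, [])
  | c :: rest =>
    let fs := pvScanB rest
    if c == '?' || c == '#' then (fs.1, [])
    else
      let seg := (c :: fs.2).take 6
      if c == '.' && pvExtsB.contains seg then (true, seg) else (fs.1, seg)

def is_file_download_url_alt (url : String) : Bool :=
  (pvScanB (PySem.Str.lower url).toList).1

-- ===== PRECONDITION & SPEC =====
def Spec_is_file_download_url (url : String) (out : Bool) : Prop := out = is_file_download_url_alt url
instance (url : String) (out : Bool) : Decidable (Spec_is_file_download_url url out) := by unfold Spec_is_file_download_url; infer_instance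

-- ===== CLAIM (what is proved, stated in full; the proofs are below) =====
def Claim_equal_is_file_download_url : Prop := ∀ (url : String), Dom_is_file_download_url url → Spec_is_file_download_url url (is_file_download_url url)

-- ===== LEMMAS AND PROOFS =====

-- non-delimiter characters (everything except '?' and '#')
def pvND (c : Char) : Bool := !(c == '?' || c == '#')

-- a "good" continuation after an extension: end of string, or a delimiter next
def pvGood (r : List Char) : Prop := r = [] ∨ ∃ d t, r = d :: t ∧ pvND d = false

lemma pvExtsB_eq_map : pvExtsB = pvExtsA.map String.toList := by rfl

lemma pvExt_facts (e : List Char) (he : e ∈ pvExtsB) :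
    e.head? = some '.' ∧ e.length ≤ 5 ∧ e.all pvND = true := by
  fin_cases he <;> exact ⟨rfl, by decide, by decide⟩

lemma pvSeg_eq : ∀ v : List Char, (pvScanB v).2 = (v.takeWhile pvND).take 6 := by
  intro v
  induction v with
  | nil => rfl
  | cons c rest ih =>
    by_cases h : (c == '?' || c == '#') = true
    · have hnd : pvND c = false := by simp [pvND, h]
      simp [pvScanB, h, hnd]
    · have hb : (c == '?' || c == '#') = false := by simpa using h
      have hnd : pvND c = true := by simp [pvND, hb]
      simp only [pvScanB, hb, Bool.false_eq_true, if_false, List.takeWhile_cons, hnd, if_true]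
      split <;> simp [ih, List.take_succ_cons, List.take_take]

lemma pvSeg_cons (c : Char) (rest : List Char) (h : pvND c = true) :
    (c :: (pvScanB rest).2).take 6 = ((c :: rest).takeWhile pvND).take 6 := by
  simp [pvSeg_eq, h, List.take_succ_cons, List.take_take]

lemma pvDropWhile_good (l : List Char) : pvGood (l.dropWhile pvND) := by
  induction l with
  | nil => exact Or.inl rfl
  | cons c rest ih =>
    by_cases h : pvND c = true
    · simpa [List.dropWhile_cons, h] using ih
    · have hb : pvND c = false := by simpa using h
      exact Or.inr ⟨c, rest, by simp [hb], hb⟩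

lemma pvTakeWhile_append_all (e r : List Char) (he : e.all pvND = true) :
    (e ++ r).takeWhile pvND = e ++ r.takeWhile pvND := by
  induction e with
  | nil => simp
  | cons c t ih =>
    simp only [List.all_cons, Bool.and_eq_true] at he
    simp [he.1, ih he.2]

lemma pvTakeWhile_good (r : List Char) (hr : pvGood r) : r.takeWhile pvND = [] := by
  rcases hr with rfl | ⟨d, t, rfl, hd⟩
  · rfl
  · simp [hd]

lemma pvCap_iff (post : List Char) :
    ((('.' :: post).takeWhile pvND).take 6 ∈ pvExtsB)
      ↔ ∃ e ∈ pvExtsB, ∃ r, '.' :: post = e ++ r ∧ pvGood r := by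
  constructor
  · intro h
    set tw := ('.' :: post).takeWhile pvND with htw
    obtain ⟨-, hlen, -⟩ := pvExt_facts _ h
    have hlt : tw.length ≤ 5 := by
      by_contra hgt
      have : (tw.take 6).length = 6 := by
        simp [List.length_take]; omega
      omega
    have htake : tw.take 6 = tw := List.take_of_length_le (by omega)
    rw [htake] at h
    refine ⟨tw, h, ('.' :: post).dropWhile pvND, ?_, pvDropWhile_good _⟩
    rw [htw, List.takeWhile_append_dropWhile]
  · rintro ⟨e, he, r, hdecomp, hgood⟩
    obtain ⟨-, hlen, hnd⟩ := pvExt_facts e he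
    rw [hdecomp, pvTakeWhile_append_all e r hnd, pvTakeWhile_good r hgood,
        List.append_nil, List.take_of_length_le (by omega)]
    exact he

lemma pvConsDecomp (c : Char) (rest : List Char) (C : List Char → Prop) :
    (∃ p q, c :: rest = p ++ '.' :: q ∧ C q)
      ↔ (c = '.' ∧ C rest) ∨ (∃ p q, rest = p ++ '.' :: q ∧ C q) := by
  constructor
  · rintro ⟨p, q, hv, hC⟩
    cases p with
    | nil =>
      simp only [List.nil_append, List.cons.injEq] at hv
      exact Or.inl ⟨hv.1, hv.2 ▸ hC⟩
    | cons a p' =>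
      simp only [List.cons_append, List.cons.injEq] at hv
      exact Or.inr ⟨p', q, hv.2, hC⟩
  · rintro (⟨rfl, hC⟩ | ⟨p, q, hv, hC⟩)
    · exact ⟨[], rest, rfl, hC⟩
    · exact ⟨c :: p, q, by simp [hv], hC⟩

lemma pvFound_iff : ∀ v : List Char, (pvScanB v).1 = true ↔
    ∃ p q, v = p ++ '.' :: q ∧ (('.' :: q).takeWhile pvND).take 6 ∈ pvExtsB := by
  intro v
  induction v with
  | nil =>
    simp only [pvScanB]
    constructor
    · intro h; exact absurd h (by decide)
    · rintro ⟨p, q, hv, -⟩; exact absurd hv (by simp)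
  | cons c rest ih =>
    rw [pvConsDecomp]
    by_cases h : (c == '?' || c == '#') = true
    · have hne : ¬ c = '.' := by
        rcases Bool.or_eq_true .. |>.mp h with h' | h' <;>
          simp only [beq_iff_eq] at h' <;> subst h' <;> decide
      simp only [pvScanB, h, if_true]
      rw [ih]
      constructor
      · exact Or.inr
      · rintro (⟨hc, -⟩ | hr)
        · exact absurd hc hne
        · exact hr
    · have hb : (c == '?' || c == '#') = false := by simpa using h
      have hnd : pvND c = true := by simp [pvND, hb]
      simp only [pvScanB, hb, Bool.false_eq_true, if_false]
      by_cases hm : (c == '.' && pvExtsB.contains ((c :: (pvScanB rest).2).take 6)) = true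
      · simp only [hm, if_true, true_iff]
        rw [Bool.and_eq_true, beq_iff_eq] at hm
        obtain ⟨rfl, hmem⟩ := hm
        rw [pvSeg_cons _ _ hnd, List.contains_iff_mem] at hmem
        exact Or.inl ⟨rfl, hmem⟩
      · have hm' : (c == '.' && pvExtsB.contains ((c :: (pvScanB rest).2).take 6)) = false := by
          simpa using hm
        simp only [hm', Bool.false_eq_true, if_false]
        rw [ih]
        constructor
        · exact Or.inr
        · rintro (⟨rfl, hC⟩ | hr)
          · exfalso
            apply hm
            rw [Bool.and_eq_true, beq_iff_eq]
            refine ⟨rfl, ?_⟩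
            rw [pvSeg_cons _ _ hnd, List.contains_iff_mem]
            exact hC
          · exact hr

lemma pvExt_cases (e : List Char) (v : List Char) :
    (PySem.Chars.endswith v e
      || PySem.Chars.isIn (e ++ ['?']) v
      || PySem.Chars.isIn (e ++ ['#']) v) = true
      ↔ ∃ p r, v = p ++ e ++ r ∧ pvGood r := by
  simp only [Bool.or_eq_true, PySem.Chars.endswith_iff, PySem.Chars.isIn_iff_infix]
  constructor
  · rintro ((⟨t, ht⟩ | ⟨s, t, ht⟩) | ⟨s, t, ht⟩)
    · exact ⟨t, [], by simp [ht], Or.inl rfl⟩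
    · exact ⟨s, '?' :: t, by simp [← ht], Or.inr ⟨'?', t, rfl, by decide⟩⟩
    · exact ⟨s, '#' :: t, by simp [← ht], Or.inr ⟨'#', t, rfl, by decide⟩⟩
  · rintro ⟨p, r, hv, (rfl | ⟨d, t, rfl, hd⟩)⟩
    · exact Or.inl (Or.inl ⟨p, by simp [hv]⟩)
    · have : d = '?' ∨ d = '#' := by
        simp only [pvND, Bool.not_eq_false', Bool.or_eq_true, beq_iff_eq] at hd
        exact hd
      rcases this with rfl | rfl
      · exact Or.inl (Or.inr ⟨p, t, by simp [hv]⟩)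
      · exact Or.inr ⟨p, t, by simp [hv]⟩

lemma pvMain (v : List Char) :
    (pvExtsA.any (fun ext =>
        PySem.Chars.endswith v ext.toList
          || PySem.Chars.isIn (ext.toList ++ ['?']) v
          || PySem.Chars.isIn (ext.toList ++ ['#']) v)) = (pvScanB v).1 := by
  rw [Bool.eq_iff_iff, List.any_eq_true, pvFound_iff]
  constructor
  · rintro ⟨ext, hext, hcond⟩
    have heB : ext.toList ∈ pvExtsB := by
      rw [pvExtsB_eq_map]; exact List.mem_map_of_mem hext
    obtain ⟨p, r, hv, hgood⟩ := (pvExt_cases ext.toList v).mp hcond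
    obtain ⟨hhead, -, -⟩ := pvExt_facts _ heB
    obtain ⟨t, ht⟩ := List.head?_eq_some_iff.mp hhead
    refine ⟨p, t ++ r, ?_, ?_⟩
    · rw [hv, ht]; simp
    · exact (pvCap_iff (t ++ r)).mpr ⟨ext.toList, heB, r, by rw [ht]; simp, hgood⟩
  · rintro ⟨p, q, hv, hC⟩
    obtain ⟨e, heB, r, hdq, hgood⟩ := (pvCap_iff q).mp hC
    have heA : ∃ ext ∈ pvExtsA, ext.toList = e := by
      rw [pvExtsB_eq_map] at heB
      simpa using heB
    obtain ⟨ext, hext, rfl⟩ := heA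
    refine ⟨ext, hext, (pvExt_cases ext.toList v).mpr ⟨p, r, ?_, hgood⟩⟩
    rw [hv, hdq]; simp

-- ===== VERDICT (by name: the statement is the Claim_ definition above) =====
theorem is_file_download_url_spec : Claim_equal_is_file_download_url := by
  intro url _
  unfold Spec_is_file_download_url is_file_download_url is_file_download_url_alt
  rw [← pvMain]
  simp only [PySem.Str.endswith_eq, PySem.Str.isIn_eq, String.toList_append]
  rfl
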